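-- pv_equiv track=rewrite | github.com/theanine/descent-dice | dice.py | doProdSum
-- ===== SOURCE A (Python) =====
-- import itertools
-- from collections import defaultdict
--
-- def doProdSum(list_of_dicts):
-- 	# We reorganize the data by key
-- 	lists_by_key = defaultdict(list)
-- 	for d in list_of_dicts:
-- 		for k, v in d.items():
-- 			lists_by_key[k].append(v)
--
-- 	# Then we generate the output
-- 	out = {}
-- 	for key, lists in lists_by_key.items():
-- 		out[key] = [sum(prod) for prod in itertools.product(*lists)]
--
-- 	return out
-- ===== SOURCE B (Python) =====
-- def doProdSum(list_of_dicts):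
-- 	# One pass: fold each value-list into the running partial sums per key,
-- 	# instead of grouping first and re-summing every full product tuple.
-- 	out = {}
-- 	for d in list_of_dicts:
-- 		for k, v in d.items():
-- 			out[k] = [s + x for s in out.get(k, [0]) for x in v]
-- 	return out
-- ===== Notes on version B (the rewrite author's own statement) =====
-- stated objective: alternative
-- what changed: B folds each value-list into a running list of partial sums per key in one pass (no intermediate grouping, no itertools.product, no per-tuple sum), where A groups lists per key and then sums every full n-tuple of the cartesian product; intended as fewer additions per product element (measured 2.27x at n=64, unconfirmed at larger sizes where the exponential output dominates).
import Mathlib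
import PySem

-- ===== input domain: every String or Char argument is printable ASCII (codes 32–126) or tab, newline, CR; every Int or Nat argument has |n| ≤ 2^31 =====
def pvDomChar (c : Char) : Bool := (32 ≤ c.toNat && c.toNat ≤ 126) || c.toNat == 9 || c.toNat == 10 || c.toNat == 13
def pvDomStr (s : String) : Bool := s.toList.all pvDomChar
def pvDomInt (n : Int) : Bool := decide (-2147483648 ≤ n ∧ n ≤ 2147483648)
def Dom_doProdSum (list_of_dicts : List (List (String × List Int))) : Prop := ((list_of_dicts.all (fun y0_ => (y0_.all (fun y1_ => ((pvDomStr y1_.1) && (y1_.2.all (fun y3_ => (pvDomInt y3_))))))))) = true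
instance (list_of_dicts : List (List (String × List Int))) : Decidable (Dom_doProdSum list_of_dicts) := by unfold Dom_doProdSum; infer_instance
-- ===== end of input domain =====

-- B replaces A's group-then-product-then-sum with a single pass folding each value-list
-- into the running partial sums per key (objective: alternative algorithm; it avoids
-- materialising product tuples, but the output itself dominates the cost).

-- ===== PORT A =====
-- itertools.product(*lists): leftmost factor varies slowest
def pyProduct : List (List Int) → List (List Int)
  | [] => [[]]
  | l :: ls => l.flatMap (fun x => (pyProduct ls).map (fun t => x :: t))

-- sum(prod)
def pySum (t : List Int) : Int := t.foldl (· + ·) 0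

def doProdSum (list_of_dicts : List (List (String × List Int))) : List (String × List Int) :=
  -- lists_by_key = defaultdict(list); for d in list_of_dicts: for k, v in d.items(): lists_by_key[k].append(v)
  let lists_by_key : PySem.Dict String (List (List Int)) :=
    list_of_dicts.foldl
      (fun acc d => (PySem.Dict.ofList d).items.foldl
        (fun acc kv => acc.modify kv.1 [] (fun ls => ls ++ [kv.2])) acc)
      PySem.Dict.empty
  -- out = {}; for key, lists in lists_by_key.items(): out[key] = [sum(prod) for prod in itertools.product(*lists)]
  let out : PySem.Dict String (List Int) :=
    lists_by_key.items.foldl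
      (fun out kl => out.insert kl.1 ((pyProduct kl.2).map pySum)) PySem.Dict.empty
  out.items

-- ===== PORT B =====
-- [s + x for s in out.get(k, [0]) for x in v]
def pvExtend (ss : List Int) (v : List Int) : List Int :=
  ss.flatMap (fun s => v.map (fun x => s + x))

def doProdSum_alt (list_of_dicts : List (List (String × List Int))) : List (String × List Int) :=
  (list_of_dicts.foldl
    (fun out d => (PySem.Dict.ofList d).items.foldl
      (fun out kv => out.insert kv.1 (pvExtend (out.getD kv.1 [0]) kv.2)) out)
    PySem.Dict.empty).items

-- ===== PRECONDITION & SPEC =====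
def Spec_doProdSum (list_of_dicts : List (List (String × List Int))) (out : List (String × List Int)) : Prop := out = doProdSum_alt list_of_dicts
instance (list_of_dicts : List (List (String × List Int))) (out : List (String × List Int)) : Decidable (Spec_doProdSum list_of_dicts out) := by unfold Spec_doProdSum; infer_instance

-- ===== CLAIM (what is proved, stated in full; the proofs are below) =====
def Claim_equal_doProdSum : Prop := ∀ (list_of_dicts : List (List (String × List Int))), Dom_doProdSum list_of_dicts → Spec_doProdSum list_of_dicts (doProdSum list_of_dicts)

-- ===== LEMMAS AND PROOFS =====

-- partial sums of the product of ls, B-style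
def pvSums (ls : List (List Int)) : List Int := ls.foldl pvExtend [0]

theorem foldl_pvExtend (ls : List (List Int)) (ss : List Int) :
    ls.foldl pvExtend ss = ss.flatMap (fun s => (pvSums ls).map (fun y => s + y)) := by
  induction ls generalizing ss with
  | nil => simp [pvSums]
  | cons l ls ih =>
    show (ls.foldl pvExtend (pvExtend ss l)) = _
    rw [ih (pvExtend ss l)]
    have h0 : pvSums (l :: ls) = (pvExtend [0] l).flatMap (fun s => (pvSums ls).map (fun y => s + y)) := by
      show ls.foldl pvExtend (pvExtend [0] l) = _
      rw [ih (pvExtend [0] l)]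
    rw [h0]
    simp [pvExtend, List.flatMap_assoc, List.map_flatMap, List.flatMap_map, Int.add_assoc]

theorem prod_sum (ls : List (List Int)) : (pyProduct ls).map pySum = pvSums ls := by
  induction ls with
  | nil => simp [pyProduct, pvSums, pySum]
  | cons l ls ih =>
    have hsh : ∀ (t : List Int) (a : Int), t.foldl (· + ·) a = a + t.foldl (· + ·) 0 := by
      intro t
      induction t with
      | nil => intro a; simp
      | cons y t iht =>
        intro a
        show t.foldl (· + ·) (a + y) = a + t.foldl (· + ·) (0 + y)
        rw [iht (a + y), iht (0 + y)]
        ring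
    have hsum : ∀ (x : Int) (t : List Int), pySum (x :: t) = x + pySum t := by
      intro x t
      show t.foldl (· + ·) (0 + x) = x + t.foldl (· + ·) 0
      rw [hsh t (0 + x)]
      ring
    have h0 : pvSums (l :: ls) = l.flatMap (fun x => (pvSums ls).map (fun y => x + y)) := by
      show ls.foldl pvExtend (pvExtend [0] l) = _
      rw [foldl_pvExtend]
      simp [pvExtend]
    rw [h0]
    simp only [pyProduct, List.map_flatMap, List.map_map]
    congr 1
    funext x
    rw [← ih, List.map_map]
    congr 1
    funext t
    exact hsum x t

-- invariant between A's grouping dict G and B's partial-sums dict B over one stream of pairs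
theorem inv_foldl (ps : List (String × List Int)) (G : PySem.Dict String (List (List Int)))
    (B : PySem.Dict String (List Int))
    (hnd : G.keys.Nodup)
    (h : B.items = G.items.map (fun kl => (kl.1, pvSums kl.2))) :
    (ps.foldl (fun out kv => out.insert kv.1 (pvExtend (out.getD kv.1 [0]) kv.2)) B).items
      = (ps.foldl (fun acc kv => acc.modify kv.1 [] (fun ls => ls ++ [kv.2])) G).items.map
          (fun kl => (kl.1, pvSums kl.2))
    ∧ (ps.foldl (fun acc kv => acc.modify kv.1 [] (fun ls => ls ++ [kv.2])) G).keys.Nodup := by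
  induction ps generalizing G B with
  | nil => exact ⟨h, hnd⟩
  | cons kv ps ih =>
    obtain ⟨k, v⟩ := kv
    have hkeys : B.keys = G.keys := by
      simp only [PySem.Dict.keys, h, List.map_map]
      rfl
    have hcont : B.contains k = G.contains k := by
      classical
      rw [PySem.Dict.contains_eq_decide_mem_keys, PySem.Dict.contains_eq_decide_mem_keys, hkeys]
    simp only [List.foldl_cons]
    by_cases hc : G.contains k = true
    · -- key present: both inserts replace in place
      obtain ⟨ls, hmem⟩ : ∃ ls, (k, ls) ∈ G.items := by
        rw [PySem.Dict.contains_iff_mem_keys] at hc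
        simp only [PySem.Dict.keys, List.mem_map] at hc
        obtain ⟨p, hp, hpk⟩ := hc
        exact ⟨p.2, by rwa [show (k, p.2) = p from by rw [← hpk]]⟩
      have hG : G.getD k [] = ls := PySem.Dict.getD_of_mem_items G hmem hnd []
      have hBmem : (k, pvSums ls) ∈ B.items := by
        rw [h]; exact List.mem_map.mpr ⟨(k, ls), hmem, rfl⟩
      have hBnd : B.keys.Nodup := by rw [hkeys]; exact hnd
      have hB : B.getD k [0] = pvSums ls := PySem.Dict.getD_of_mem_items B hBmem hBnd [0]
      have hBc : B.contains k = true := by rw [hcont]; exact hc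
      have hGi : (G.modify k [] (fun l => l ++ [v])).items
          = G.items.map (fun p => if p.1 == k then (k, ls ++ [v]) else p) := by
        show (G.insert k (G.getD k [] ++ [v])).items = _
        rw [PySem.Dict.items_insert_of_contains G _ hc, hG]
      have hBi : (B.insert k (pvExtend (B.getD k [0]) v)).items
          = B.items.map (fun p => if p.1 == k then (k, pvExtend (pvSums ls) v) else p) := by
        rw [PySem.Dict.items_insert_of_contains B _ hBc, hB]
      have hkeysG : (G.modify k [] (fun l => l ++ [v])).keys = G.keys := by
        simp only [PySem.Dict.keys, hGi, List.map_map]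
        apply List.map_congr_left
        intro p _
        by_cases hpk : p.1 == k
        · simp only [Function.comp, hpk, if_pos]
          exact (eq_of_beq hpk).symm
        · simp [Function.comp, hpk]
      refine ih _ _ (by rw [hkeysG]; exact hnd) ?_
      rw [hBi, hGi, h, List.map_map, List.map_map]
      apply List.map_congr_left
      intro p _
      by_cases hpk : p.1 == k
      · simp only [Function.comp, hpk, if_pos]
        simp [pvSums, List.foldl_append, pvExtend]
      · simp [Function.comp, hpk]
    · -- fresh key: both inserts append
      have hGc : G.contains k = false := by simpa using hc
      have hBc : B.contains k = false := by rw [hcont]; exact hGc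
      have hGd : G.getD k [] = [] := PySem.Dict.getD_of_not_contains G [] hGc
      have hBd : B.getD k [0] = [0] := PySem.Dict.getD_of_not_contains B [0] hBc
      have hGi : (G.modify k [] (fun l => l ++ [v])).items = G.items ++ [(k, [v])] := by
        show (G.insert k (G.getD k [] ++ [v])).items = _
        rw [PySem.Dict.items_insert_of_not_contains G _ hGc, hGd]
        rfl
      have hBi : (B.insert k (pvExtend (B.getD k [0]) v)).items
          = B.items ++ [(k, pvExtend [0] v)] := by
        rw [PySem.Dict.items_insert_of_not_contains B _ hBc, hBd]
      have hkn : k ∉ G.keys := by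
        intro hmem
        rw [← PySem.Dict.contains_iff_mem_keys] at hmem
        rw [hGc] at hmem
        exact Bool.false_ne_true hmem
      have hndG : (G.modify k [] (fun l => l ++ [v])).keys.Nodup := by
        simp only [PySem.Dict.keys, hGi, List.map_append]
        rw [List.map_cons, List.map_nil, List.nodup_append]
        refine ⟨hnd, List.nodup_singleton _, ?_⟩
        intro a ha b hb heq
        rw [List.mem_singleton] at hb
        rw [heq, hb] at ha
        exact hkn ha
      refine ih _ _ hndG ?_
      rw [hBi, hGi, h, List.map_append]
      simp [pvSums, pvExtend]

-- ===== VERDICT (by name: the statement is the Claim_ definition above) =====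
theorem doProdSum_spec : Claim_equal_doProdSum := by
  intro lod _
  show doProdSum lod = doProdSum_alt lod
  unfold doProdSum doProdSum_alt
  have hflat : ∀ {ν : Type} (step : PySem.Dict String ν → String × List Int → PySem.Dict String ν)
      (init : PySem.Dict String ν),
      lod.foldl (fun acc d => (PySem.Dict.ofList d).items.foldl step acc) init
        = (lod.flatMap (fun d => (PySem.Dict.ofList d).items)).foldl step init := by
    intro ν step init
    rw [List.foldl_flatMap]
  rw [hflat, hflat]
  set ps := lod.flatMap (fun d => (PySem.Dict.ofList d).items) with hps
  have hinv := inv_foldl ps PySem.Dict.empty PySem.Dict.empty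
    (by simp [PySem.Dict.keys, PySem.Dict.empty]) (by simp [PySem.Dict.empty])
  set G := ps.foldl (fun acc kv => acc.modify kv.1 [] (fun ls => ls ++ [kv.2])) PySem.Dict.empty with hG
  obtain ⟨hB, hnd⟩ := hinv
  have hfresh := PySem.Dict.items_foldl_insert_fresh G.items (fun kl => kl.1)
    (fun kl => (pyProduct kl.2).map pySum) PySem.Dict.empty
    (by intro a _; simp [PySem.Dict.contains_empty]) hnd
  simp only [hfresh, hB]
  have : (PySem.Dict.empty : PySem.Dict String (List Int)).items = [] := rfl
  rw [this, List.nil_append]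
  apply List.map_congr_left
  intro kl _
  rw [prod_sum]
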